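-- pv_equiv track=rewrite | github.com/60jong/ProblemSolving | solved_ac/BOJ/BFS/테트로미노.py | calShape1
-- ===== SOURCE A (Python) =====
-- def calShape1(scores): # [ㅡ] -> 2개 존재
--     maxScore = 0
--     count = 0
--     #[ㅡ]
--     for y in range(len(scores)):
--         for x in range(len(scores[0]) - 3):
--             score = scores[y][x] + scores[y][x + 1] + scores[y][x + 2] + scores[y][x + 3]
--             if score > maxScore:
--                 maxScore = score
--
--     #[|]
--     for y in range(len(scores) - 3):
--         for x in range(len(scores[0])):
--             score = scores[y][x] + scores[y + 1][x] + scores[y + 2][x] + scores[y + 3][x]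
--             if score > maxScore:
--                 maxScore = score
--     return maxScore
-- ===== SOURCE B (Python) =====
-- def calShape1(scores):
--     best = 0
--     width = len(scores[0]) if scores else 0
--     # horizontal: per-row prefix sums, window sum = pref[x+4] - pref[x]
--     if width > 3:
--         for row in scores:
--             pref = [0]
--             for x in range(width):
--                 pref.append(pref[-1] + row[x])
--             for x in range(width - 3):
--                 d = pref[x + 4] - pref[x]
--                 best = max(best, d)
--     # vertical: running column-wise prefix rows, window = prefs[y+4][x] - prefs[y][x]
--     if len(scores) > 3:
--         col = [0] * width
--         prefs = [col]
--         for row in scores: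
--             col = [col[x] + row[x] for x in range(width)]
--             prefs.append(col)
--         for y in range(len(scores) - 3):
--             for x in range(width):
--                 d = prefs[y + 4][x] - prefs[y][x]
--                 best = max(best, d)
--     return best
-- ===== Notes on version B (the rewrite author's own statement) =====
-- stated objective: alternative
-- what changed: A re-adds the four cells of every window directly; B builds per-row prefix sums and a running column-wise prefix grid once and obtains each horizontal/vertical window sum as a difference of two prefix values.
import Mathlib
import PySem

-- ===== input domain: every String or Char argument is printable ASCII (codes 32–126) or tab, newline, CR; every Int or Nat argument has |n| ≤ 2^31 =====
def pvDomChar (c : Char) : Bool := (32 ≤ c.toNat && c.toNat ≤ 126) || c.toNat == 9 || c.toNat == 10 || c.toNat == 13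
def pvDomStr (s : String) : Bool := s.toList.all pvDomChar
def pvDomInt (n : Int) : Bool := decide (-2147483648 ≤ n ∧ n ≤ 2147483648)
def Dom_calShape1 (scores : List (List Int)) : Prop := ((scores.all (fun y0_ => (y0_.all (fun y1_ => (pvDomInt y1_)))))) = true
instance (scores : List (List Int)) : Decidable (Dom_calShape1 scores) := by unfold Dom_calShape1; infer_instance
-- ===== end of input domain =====

-- B replaces A's direct re-addition of each 4-cell window by prefix sums: per-row prefix
-- lists and a running column-wise prefix grid, every window sum a difference of two
-- prefix values (objective: alternative algorithm, same cost).

-- ===== PORT A =====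
def calShape1 (scores : List (List Int)) : Int :=
  let n0 : Int := ((PySem.List.pyGetD scores 0 []).length : Int)
  let ms1 : Int :=
    (PySem.List.pyRange 0 (scores.length : Int) 1).foldl (fun acc y =>
      (PySem.List.pyRange 0 (n0 - 3) 1).foldl (fun acc x =>
        let score := PySem.List.pyGetD (PySem.List.pyGetD scores y []) x 0 +
                     PySem.List.pyGetD (PySem.List.pyGetD scores y []) (x + 1) 0 +
                     PySem.List.pyGetD (PySem.List.pyGetD scores y []) (x + 2) 0 +
                     PySem.List.pyGetD (PySem.List.pyGetD scores y []) (x + 3) 0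
        if score > acc then score else acc) acc) 0
  (PySem.List.pyRange 0 ((scores.length : Int) - 3) 1).foldl (fun acc y =>
    (PySem.List.pyRange 0 n0 1).foldl (fun acc x =>
      let score := PySem.List.pyGetD (PySem.List.pyGetD scores y []) x 0 +
                   PySem.List.pyGetD (PySem.List.pyGetD scores (y + 1) []) x 0 +
                   PySem.List.pyGetD (PySem.List.pyGetD scores (y + 2) []) x 0 +
                   PySem.List.pyGetD (PySem.List.pyGetD scores (y + 3) []) x 0
      if score > acc then score else acc) acc) ms1

-- ===== PORT B =====
-- pref[-1] is ported as pyGetD pref (-1) 0; pref is never empty, so this is exact.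
def calShape1_alt (scores : List (List Int)) : Int :=
  let width : Int := if scores.isEmpty then 0 else ((scores.headD []).length : Int)
  let best1 : Int :=
    if width > 3 then
      scores.foldl (fun best row =>
        let pref : List Int := (PySem.List.pyRange 0 width 1).foldl
          (fun pref x => pref ++ [PySem.List.pyGetD pref (-1) 0 + PySem.List.pyGetD row x 0]) [0]
        (PySem.List.pyRange 0 (width - 3) 1).foldl (fun best x =>
          let d := PySem.List.pyGetD pref (x + 4) 0 - PySem.List.pyGetD pref x 0
          max best d) best) 0
    else 0
  if (scores.length : Int) > 3 then
    let cp : List Int × List (List Int) := scores.foldl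
      (fun st row =>
        let col := (PySem.List.pyRange 0 width 1).map
          (fun x => PySem.List.pyGetD st.1 x 0 + PySem.List.pyGetD row x 0)
        (col, st.2 ++ [col]))
      (List.replicate width.toNat 0, [List.replicate width.toNat 0])
    (PySem.List.pyRange 0 ((scores.length : Int) - 3) 1).foldl (fun best y =>
      (PySem.List.pyRange 0 width 1).foldl (fun best x =>
        let d := PySem.List.pyGetD (PySem.List.pyGetD cp.2 (y + 4) []) x 0 -
                 PySem.List.pyGetD (PySem.List.pyGetD cp.2 y []) x 0
        max best d) best) best1
  else best1

-- ===== PRECONDITION & SPEC =====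
-- Pre_ excludes exactly the inputs on which A raises IndexError: grids with a row shorter
-- than row 0 whose cells the scans reach (row-0 width ≥ 4, or at least 4 rows and a
-- nonempty row 0); A returns normally on every other input.
def Pre_calShape1 (scores : List (List Int)) : Prop :=
  ((scores.getD 0 []).length ≥ 4 ∨ (scores.length ≥ 4 ∧ (scores.getD 0 []).length ≥ 1)) →
    ∀ row ∈ scores, (scores.getD 0 []).length ≤ row.length
instance (scores : List (List Int)) : Decidable (Pre_calShape1 scores) := by
  unfold Pre_calShape1; infer_instance

def pvWitness_calShape1 : List (List Int) := [[1, 2, 3, 4], [5, 6, 7, 8]]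

def Spec_calShape1 (scores : List (List Int)) (out : Int) : Prop := out = calShape1_alt scores
instance (scores : List (List Int)) (out : Int) : Decidable (Spec_calShape1 scores out) := by
  unfold Spec_calShape1; infer_instance

-- ===== CLAIM (what is proved, stated in full; the proofs are below) =====
def Claim_equal_calShape1 : Prop := ∀ (scores : List (List Int)), Dom_calShape1 scores → Pre_calShape1 scores → Spec_calShape1 scores (calShape1 scores)

-- ===== LEMMAS AND PROOFS =====

-- row prefix sum: S row k = row[0] + … + row[k-1] (getD, default 0)
def S (row : List Int) (k : Nat) : Int := ((List.range k).map (fun i => row.getD i 0)).sum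

-- column prefix sum: Tc scores y j = scores[0][j] + … + scores[y-1][j]
def Tc (scores : List (List Int)) (y j : Nat) : Int :=
  ((List.range y).map (fun t => (scores.getD t []).getD j 0)).sum

def colAt (scores : List (List Int)) (n y : Nat) : List Int :=
  (List.range n).map (fun j => Tc scores y j)

lemma S_succ (row : List Int) (k : Nat) : S row (k + 1) = S row k + row.getD k 0 := by
  simp [S, List.range_succ]

lemma Tc_succ (scores : List (List Int)) (y j : Nat) :
    Tc scores (y + 1) j = Tc scores y j + (scores.getD y []).getD j 0 := by
  simp [Tc, List.range_succ]

lemma if_gt_eq_max (a s : Int) : (if s > a then s else a) = max a s := by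
  rw [max_def]; split_ifs <;> omega

lemma getD_range_map {α : Type} (xs : List α) (d : α) :
    (List.range xs.length).map (fun y => xs.getD y d) = xs := by
  apply List.ext_getElem
  · simp
  · intro i h1 h2
    simp [List.getD_eq_getElem?_getD]
    simp [List.getElem?_eq_getElem (by simpa using h1)]

-- B's per-row prefix fold builds the list of prefix sums
lemma prefFold (row : List Int) (m : Nat) :
    (List.range m).foldl
      (fun pref k => pref ++ [PySem.List.pyGetD pref (-1) 0 +
                              PySem.List.pyGetD row ((0 : Int) + (k : Nat)) 0]) [0]
    = (List.range (m + 1)).map (S row) := by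
  induction m with
  | zero => simp [S]
  | succ m ih =>
    rw [List.range_succ, List.foldl_append, ih, List.foldl_cons, List.foldl_nil]
    have hsp : (List.range (m + 1)).map (S row) = (List.range m).map (S row) ++ [S row m] := by
      rw [List.range_succ, List.map_append]; rfl
    rw [hsp, PySem.List.pyGetD_neg_one_append_singleton]
    have hlast : S row m + PySem.List.pyGetD row ((0 : Int) + (m : Nat)) 0 = S row (m + 1) := by
      rw [zero_add, PySem.List.pyGetD_natCast, S_succ]
    rw [hlast]
    conv_rhs => rw [List.range_succ, List.map_append, hsp]
    rfl

-- A's horizontal inner loop = canonical prefix-difference fold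
lemma hinnerA (row : List Int) (n : Nat) (b : Int) :
    (PySem.List.pyRange 0 ((n : Int) - 3) 1).foldl (fun acc x =>
      let score := PySem.List.pyGetD row x 0 + PySem.List.pyGetD row (x + 1) 0 +
                   PySem.List.pyGetD row (x + 2) 0 + PySem.List.pyGetD row (x + 3) 0
      if score > acc then score else acc) b
    = (List.range (n - 3)).foldl (fun acc k => max acc (S row (k + 4) - S row k)) b := by
  rw [PySem.List.pyRange_one, List.foldl_map]
  have hn : ((n : Int) - 3 - 0).toNat = n - 3 := by omega
  rw [hn]
  apply List.foldl_ext
  intro a k _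
  show (if _ > a then _ else a) = max a (S row (k + 4) - S row k)
  rw [if_gt_eq_max]
  congr 1
  simp only [zero_add]
  have h2 : ((k : Int) + 1) = (((k + 1 : Nat)) : Int) := by omega
  have h3 : ((k : Int) + 2) = (((k + 2 : Nat)) : Int) := by omega
  have h4 : ((k : Int) + 3) = (((k + 3 : Nat)) : Int) := by omega
  rw [h2, h3, h4]
  simp only [PySem.List.pyGetD_natCast]
  have e4 : S row (k + 4) = S row k + row.getD k 0 + row.getD (k+1) 0 +
      row.getD (k+2) 0 + row.getD (k+3) 0 := by
    have a1 := S_succ row k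
    have a2 := S_succ row (k+1)
    have a3 := S_succ row (k+2)
    have a4 := S_succ row (k+3)
    rw [show k+1+1 = k+2 by omega] at a2
    rw [show k+2+1 = k+3 by omega] at a3
    rw [show k+3+1 = k+4 by omega] at a4
    omega
  omega

-- B's horizontal inner loop (over the prefix list) = the same canonical fold
lemma hinnerB (row : List Int) (n : Nat) (b : Int) :
    (PySem.List.pyRange 0 ((n : Int) - 3) 1).foldl (fun best x =>
      let d := PySem.List.pyGetD ((List.range (n + 1)).map (S row)) (x + 4) 0 -
               PySem.List.pyGetD ((List.range (n + 1)).map (S row)) x 0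
      max best d) b
    = (List.range (n - 3)).foldl (fun acc k => max acc (S row (k + 4) - S row k)) b := by
  rw [PySem.List.pyRange_one, List.foldl_map]
  have hn : ((n : Int) - 3 - 0).toNat = n - 3 := by omega
  rw [hn]
  apply List.foldl_ext
  intro a k hk
  have hk' : k < n - 3 := List.mem_range.mp hk
  show max a _ = max a (S row (k + 4) - S row k)
  congr 1
  simp only [zero_add]
  have h2 : ((k : Int) + 4) = (((k + 4 : Nat)) : Int) := by omega
  rw [h2, PySem.List.pyGetD_natCast, PySem.List.pyGetD_natCast,
      PySem.List.getD_map_range _ _ _ _ (by omega : k + 4 < n + 1),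
      PySem.List.getD_map_range _ _ _ _ (by omega : k < n + 1)]

-- B's running column fold builds colAt prefixes
lemma colFold (scores : List (List Int)) (n : Nat) (m : Nat) :
    (List.range m).foldl
      (fun (st : List Int × List (List Int)) y =>
        let col := (List.range n).map (fun j => st.1.getD j 0 + (scores.getD y []).getD j 0)
        (col, st.2 ++ [col]))
      (colAt scores n 0, [colAt scores n 0])
    = (colAt scores n m, (List.range (m + 1)).map (colAt scores n)) := by
  induction m with
  | zero => simp
  | succ m ih =>
    rw [List.range_succ, List.foldl_append, ih, List.foldl_cons, List.foldl_nil]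
    have hcol : (List.range n).map
        (fun j => (colAt scores n m).getD j 0 + (scores.getD m []).getD j 0)
        = colAt scores n (m + 1) := by
      unfold colAt
      apply List.map_congr_left
      intro j hj
      rw [PySem.List.getD_map_range _ _ _ _ (List.mem_range.mp hj), ← Tc_succ]
    dsimp only
    rw [hcol]
    congr 1
    conv_rhs => rw [List.range_succ, List.map_append]
    rfl

lemma colAt_zero (scores : List (List Int)) (n : Nat) :
    colAt scores n 0 = List.replicate n 0 := by
  unfold colAt Tc
  simp

-- A's vertical score = column prefix difference
lemma vscore_eq (scores : List (List Int)) (k j : Nat) :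
    Tc scores (k + 4) j - Tc scores k j =
      (scores.getD k []).getD j 0 + (scores.getD (k+1) []).getD j 0 +
      (scores.getD (k+2) []).getD j 0 + (scores.getD (k+3) []).getD j 0 := by
  have a1 := Tc_succ scores k j
  have a2 := Tc_succ scores (k+1) j
  have a3 := Tc_succ scores (k+2) j
  have a4 := Tc_succ scores (k+3) j
  rw [show k+1+1 = k+2 by omega] at a2
  rw [show k+2+1 = k+3 by omega] at a3
  rw [show k+3+1 = k+4 by omega] at a4
  omega

-- A's vertical inner loop = canonical column-difference fold
lemma vinnerA (scores : List (List Int)) (k : Nat) (n : Nat) (b : Int) :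
    (PySem.List.pyRange 0 (n : Int) 1).foldl (fun acc x =>
      let score := PySem.List.pyGetD (PySem.List.pyGetD scores ((0 : Int) + (k : Nat)) []) x 0 +
                   PySem.List.pyGetD (PySem.List.pyGetD scores ((0 : Int) + (k : Nat) + 1) []) x 0 +
                   PySem.List.pyGetD (PySem.List.pyGetD scores ((0 : Int) + (k : Nat) + 2) []) x 0 +
                   PySem.List.pyGetD (PySem.List.pyGetD scores ((0 : Int) + (k : Nat) + 3) []) x 0
      if score > acc then score else acc) b
    = (List.range n).foldl (fun acc j => max acc (Tc scores (k + 4) j - Tc scores k j)) b := by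
  rw [PySem.List.pyRange_one, List.foldl_map]
  have hn : ((n : Int) - 0).toNat = n := by omega
  rw [hn]
  apply List.foldl_ext
  intro a j _
  show (if _ > a then _ else a) = max a (Tc scores (k + 4) j - Tc scores k j)
  rw [if_gt_eq_max]
  congr 1
  simp only [zero_add]
  have h2 : ((k : Int) + 1) = (((k + 1 : Nat)) : Int) := by omega
  have h3 : ((k : Int) + 2) = (((k + 2 : Nat)) : Int) := by omega
  have h4 : ((k : Int) + 3) = (((k + 3 : Nat)) : Int) := by omega
  rw [h2, h3, h4]
  simp only [PySem.List.pyGetD_natCast]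
  rw [vscore_eq]

-- B's vertical inner loop (over the prefix grid) = the same canonical fold
lemma vinnerB (scores : List (List Int)) (L : Nat) (k : Nat) (hk : k < L - 3) (n : Nat) (b : Int) :
    (PySem.List.pyRange 0 (n : Int) 1).foldl (fun best x =>
      let d := PySem.List.pyGetD
                 (PySem.List.pyGetD ((List.range (L + 1)).map (colAt scores n)) ((0 : Int) + (k : Nat) + 4) []) x 0 -
               PySem.List.pyGetD
                 (PySem.List.pyGetD ((List.range (L + 1)).map (colAt scores n)) ((0 : Int) + (k : Nat)) []) x 0
      max best d) b
    = (List.range n).foldl (fun acc j => max acc (Tc scores (k + 4) j - Tc scores k j)) b := by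
  rw [PySem.List.pyRange_one, List.foldl_map]
  have hn : ((n : Int) - 0).toNat = n := by omega
  rw [hn]
  apply List.foldl_ext
  intro a j hj
  have hj' : j < n := List.mem_range.mp hj
  show max a _ = max a (Tc scores (k + 4) j - Tc scores k j)
  congr 1
  simp only [zero_add]
  have h2 : ((k : Int) + 4) = (((k + 4 : Nat)) : Int) := by omega
  rw [h2]
  simp only [PySem.List.pyGetD_natCast]
  rw [PySem.List.getD_map_range _ _ _ _ (by omega : k + 4 < L + 1),
      PySem.List.getD_map_range _ _ _ _ (by omega : k < L + 1)]
  unfold colAt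
  rw [PySem.List.getD_map_range _ _ _ _ hj', PySem.List.getD_map_range _ _ _ _ hj']

-- the B-side width expression is row 0's length
lemma widthEq (scores : List (List Int)) :
    (if scores.isEmpty then (0 : Int) else ((scores.headD []).length : Int))
      = (((scores.getD 0 []).length : Nat) : Int) := by
  cases scores <;> simp

lemma foldl_keep {α β : Type} (l : List β) (i : α) : l.foldl (fun a _ => a) i = i := by
  induction l generalizing i with
  | nil => rfl
  | cons x t ih => exact ih i

lemma main_eq (scores : List (List Int)) : calShape1 scores = calShape1_alt scores := by
  unfold calShape1 calShape1_alt
  rw [widthEq]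
  set n := (scores.getD 0 []).length with hn
  dsimp only
  rw [PySem.List.pyGetD_zero, ← hn]
  -- horizontal parts
  have hH :
      (PySem.List.pyRange 0 (scores.length : Int) 1).foldl (fun acc y =>
        (PySem.List.pyRange 0 ((n : Int) - 3) 1).foldl (fun acc x =>
          let score := PySem.List.pyGetD (PySem.List.pyGetD scores y []) x 0 +
                       PySem.List.pyGetD (PySem.List.pyGetD scores y []) (x + 1) 0 +
                       PySem.List.pyGetD (PySem.List.pyGetD scores y []) (x + 2) 0 +
                       PySem.List.pyGetD (PySem.List.pyGetD scores y []) (x + 3) 0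
          if score > acc then score else acc) acc) 0
      = (if ((n : Int) > 3) then
          scores.foldl (fun best row =>
            let pref : List Int := (PySem.List.pyRange 0 (n : Int) 1).foldl
              (fun pref x => pref ++ [PySem.List.pyGetD pref (-1) 0 + PySem.List.pyGetD row x 0]) [0]
            (PySem.List.pyRange 0 ((n : Int) - 3) 1).foldl (fun best x =>
              let d := PySem.List.pyGetD pref (x + 4) 0 - PySem.List.pyGetD pref x 0
              max best d) best) 0
         else 0) := by
    by_cases h4 : ((n : Int) > 3)
    · rw [if_pos h4]
      conv_rhs => rw [← getD_range_map scores ([] : List Int), List.foldl_map]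
      rw [PySem.List.pyRange_one 0 (scores.length : Int), List.foldl_map]
      have hm : ((scores.length : Int) - 0).toNat = scores.length := by omega
      rw [hm]
      apply List.foldl_ext
      intro b y _
      simp only [zero_add, PySem.List.pyGetD_natCast]
      have hpref : (PySem.List.pyRange 0 (n : Int) 1).foldl
          (fun pref x => pref ++ [PySem.List.pyGetD pref (-1) 0 +
                                  PySem.List.pyGetD (scores.getD y []) x 0]) [0]
          = (List.range (n + 1)).map (S (scores.getD y [])) := by
        rw [PySem.List.pyRange_one, List.foldl_map]
        have hm2 : ((n : Int) - 0).toNat = n := by omega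
        rw [hm2]
        exact prefFold (scores.getD y []) n
      rw [hpref, hinnerA (scores.getD y []) n b, hinnerB (scores.getD y []) n b]
    · rw [if_neg h4]
      have hemp : PySem.List.pyRange 0 ((n : Int) - 3) 1 = [] := by
        rw [PySem.List.pyRange_one]
        have : (((n : Int) - 3) - 0).toNat = 0 := by omega
        rw [this]
        rfl
      rw [hemp]
      simp only [List.foldl_nil]
      exact foldl_keep _ 0
  rw [hH]
  -- vertical parts
  by_cases hL : ((scores.length : Int) > 3)
  · rw [if_pos hL]
    have hcp : scores.foldl
        (fun (st : List Int × List (List Int)) row =>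
          let col := (PySem.List.pyRange 0 (n : Int) 1).map
            (fun x => PySem.List.pyGetD st.1 x 0 + PySem.List.pyGetD row x 0)
          (col, st.2 ++ [col]))
        (List.replicate ((n : Int)).toNat 0, [List.replicate ((n : Int)).toNat 0])
        = (colAt scores n scores.length, (List.range (scores.length + 1)).map (colAt scores n)) := by
      have htn : ((n : Int)).toNat = n := by omega
      rw [htn, ← colAt_zero scores n]
      conv_lhs => rw [← getD_range_map scores ([] : List Int), List.foldl_map]
      rw [← colFold scores n scores.length]
      apply List.foldl_ext
      intro st y _
      have hcol : (PySem.List.pyRange 0 (n : Int) 1).map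
          (fun x => PySem.List.pyGetD st.1 x 0 + PySem.List.pyGetD (scores.getD y []) x 0)
          = (List.range n).map (fun j => st.1.getD j 0 + (scores.getD y []).getD j 0) := by
        rw [PySem.List.pyRange_one, List.map_map]
        have hm2 : ((n : Int) - 0).toNat = n := by omega
        rw [hm2]
        apply List.map_congr_left
        intro j _
        dsimp only [Function.comp]
        simp only [zero_add, PySem.List.pyGetD_natCast]
      dsimp only
      rw [hcol]
    rw [hcp]
    dsimp only
    rw [PySem.List.pyRange_one 0 ((scores.length : Int) - 3), List.foldl_map, List.foldl_map]
    have hm : ((scores.length : Int) - 3 - 0).toNat = scores.length - 3 := by omega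
    rw [hm]
    apply List.foldl_ext
    intro b k hk
    have hk' : k < scores.length - 3 := List.mem_range.mp hk
    rw [vinnerA scores k n b, vinnerB scores scores.length k hk' n b]
  · rw [if_neg hL]
    have hemp : PySem.List.pyRange 0 ((scores.length : Int) - 3) 1 = [] := by
      rw [PySem.List.pyRange_one]
      have : (((scores.length : Int) - 3) - 0).toNat = 0 := by omega
      rw [this]
      rfl
    rw [hemp, List.foldl_nil]

-- ===== VERDICT (by name: the statement is the Claim_ definition above) =====
theorem calShape1_spec : Claim_equal_calShape1 := by
  intro scores _ _
  unfold Spec_calShape1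
  exact main_eq scores
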